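-- pv_equiv track=rewrite | github.com/Pricx/openinfomate | src/tracker/telegram_report_reader.py | _im_sanitize_block
-- ===== SOURCE A (Python) =====
-- def _im_sanitize_block(text: str) -> str:
--     """
--     Convert Markdown-ish content into IM-friendly plain text (no `#` headings or tables).
--     """
--     md = (text or "").strip()
--     if not md:
--         return ""
--
--     out: list[str] = []
--     for raw in md.splitlines():
--         line = (raw or "").rstrip()
--         s = line.strip()
--         if s.startswith(("```", "References:")):
--             out.append(line)
--             continue
--         if s.startswith("### "):
--             out.append(f"【{s[4:].strip()}】")
--             continue
--         if s.startswith("#### "):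
--             out.append(f"- {s[5:].strip()}")
--             continue
--         if s.startswith("|") and s.endswith("|"):
--             # Tables are painful on mobile; keep as a single line.
--             out.append(" ".join([p.strip() for p in s.strip("|").split("|") if p.strip()]))
--             continue
--         if s.startswith(("- ", "* ")):
--             out.append("⦁ " + s[2:].strip())
--             continue
--         out.append(line)
--
--     cleaned: list[str] = []
--     blank_run = 0
--     for ln in out:
--         if not (ln or "").strip():
--             blank_run += 1
--             if blank_run <= 1:
--                 cleaned.append("")
--             continue
--         blank_run = 0
--         cleaned.append(ln.rstrip())
--
--     return "\n".join([ln for ln in cleaned]).strip()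
-- ===== SOURCE B (Python) =====
-- def _transform(raw: str) -> str:
--     s = raw.strip()
--     if s.startswith("|") and s.endswith("|"):
--         return " ".join(p.strip() for p in s.strip("|").split("|") if p.strip())
--     if s.startswith(("- ", "* ")):
--         return "\u2981 " + s[2:].strip()
--     if s.startswith("#### "):
--         return "- " + s[5:].strip()
--     if s.startswith("### "):
--         return "\u3010" + s[4:].strip() + "\u3011"
--     return raw.rstrip()
--
--
-- def _im_sanitize_block(text: str) -> str:
--     md = (text or "").strip()
--     if not md:
--         return ""
--     result: list[str] = []
--     for raw in md.splitlines():
--         t = _transform(raw)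
--         if not t.strip():
--             if not result or result[-1] != "":
--                 result.append("")
--         else:
--             result.append(t.rstrip())
--     return "\n".join(result).strip()
-- ===== Notes on version B (the rewrite author's own statement) =====
-- stated objective: simpler
-- what changed: B fuses A's two sequential passes (transform lines, then collapse blank runs) into a single loop, drops the fence/References branch (its output equals the default branch's), and replaces the blank_run counter by checking whether the last emitted line is blank.
import Mathlib
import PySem

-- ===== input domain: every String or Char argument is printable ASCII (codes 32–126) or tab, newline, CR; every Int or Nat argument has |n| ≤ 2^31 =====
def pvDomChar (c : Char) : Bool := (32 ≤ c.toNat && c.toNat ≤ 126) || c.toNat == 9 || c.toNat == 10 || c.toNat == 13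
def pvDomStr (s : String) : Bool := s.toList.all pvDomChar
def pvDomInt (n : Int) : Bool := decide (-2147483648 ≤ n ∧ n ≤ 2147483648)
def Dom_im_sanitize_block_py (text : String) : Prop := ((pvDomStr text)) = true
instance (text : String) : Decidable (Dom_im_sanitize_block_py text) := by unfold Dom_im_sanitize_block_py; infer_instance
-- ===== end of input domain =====

-- B fuses A's two passes into one loop and replaces the blank_run counter by a
-- look at the last emitted line (objective: simpler — one pass, no counter, no fence branch).

-- ===== PORT A =====
-- literal transliteration of A: first loop transforms each line, second loop collapses blank runs
def im_sanitize_block_py (text : String) : String :=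
  let md := PySem.Chars.strip text.toList     -- (text or "").strip(): 'text or ""' has the value of text
  if md.isEmpty then "" else
  let out := (PySem.Chars.splitlines md).foldl (fun out raw =>
    let line := PySem.Chars.rstrip raw        -- (raw or "").rstrip(): 'raw or ""' has the value of raw
    let s := PySem.Chars.strip line
    if PySem.Chars.startswith s ("```".toList) || PySem.Chars.startswith s ("References:".toList) then
      out ++ [line]
    else if PySem.Chars.startswith s ("### ".toList) then
      out ++ [('【' :: PySem.Chars.strip (PySem.List.slice s (some 4) none)) ++ ['】']]
    else if PySem.Chars.startswith s ("#### ".toList) then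
      out ++ ['-' :: ' ' :: PySem.Chars.strip (PySem.List.slice s (some 5) none)]
    else if PySem.Chars.startswith s ("|".toList) && PySem.Chars.endswith s ("|".toList) then
      out ++ [PySem.Chars.join [' ']
        (((PySem.Chars.splitOn (PySem.Chars.stripChars s ['|']) ['|']).filter
            (fun p => !(PySem.Chars.strip p).isEmpty)).map PySem.Chars.strip)]
    else if PySem.Chars.startswith s ("- ".toList) || PySem.Chars.startswith s ("* ".toList) then
      out ++ ['⦁' :: ' ' :: PySem.Chars.strip (PySem.List.slice s (some 2) none)]
    else out ++ [line]) []
  let cleaned := out.foldl (fun (st : List (List Char) × Int) ln =>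
    if (PySem.Chars.strip ln).isEmpty then
      (if st.2 + 1 ≤ 1 then st.1 ++ [([] : List Char)] else st.1, st.2 + 1)
    else (st.1 ++ [PySem.Chars.rstrip ln], 0)) (([], 0) : List (List Char) × Int)
  String.ofList (PySem.Chars.strip (PySem.Chars.join ['\n'] cleaned.1))

-- ===== PORT B =====
-- helper _transform of Source B: prefix dispatch, table first, no fence branch (it coincides with the default)
def pvTransform (raw : List Char) : List Char :=
  let s := PySem.Chars.strip raw
  if PySem.Chars.startswith s ("|".toList) && PySem.Chars.endswith s ("|".toList) then
    PySem.Chars.join [' ']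
      (((PySem.Chars.splitOn (PySem.Chars.stripChars s ['|']) ['|']).filter
          (fun p => !(PySem.Chars.strip p).isEmpty)).map PySem.Chars.strip)
  else if PySem.Chars.startswith s ("- ".toList) || PySem.Chars.startswith s ("* ".toList) then
    '⦁' :: ' ' :: PySem.Chars.strip (PySem.List.slice s (some 2) none)
  else if PySem.Chars.startswith s ("#### ".toList) then
    '-' :: ' ' :: PySem.Chars.strip (PySem.List.slice s (some 5) none)
  else if PySem.Chars.startswith s ("### ".toList) then
    ('【' :: PySem.Chars.strip (PySem.List.slice s (some 4) none)) ++ ['】']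
  else PySem.Chars.rstrip raw

def im_sanitize_block_py_alt (text : String) : String :=
  let md := PySem.Chars.strip text.toList
  if md.isEmpty then "" else
  let result := (PySem.Chars.splitlines md).foldl (fun res raw =>
    let t := pvTransform raw
    if (PySem.Chars.strip t).isEmpty then
      if res.isEmpty || !(PySem.List.pyGet? res (-1) == some ([] : List Char)) then
        res ++ [([] : List Char)]
      else res
    else res ++ [PySem.Chars.rstrip t]) ([] : List (List Char))
  String.ofList (PySem.Chars.strip (PySem.Chars.join ['\n'] result))

-- ===== PRECONDITION & SPEC =====
def Spec_im_sanitize_block_py (text : String) (out : String) : Prop := out = im_sanitize_block_py_alt text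
instance (text : String) (out : String) : Decidable (Spec_im_sanitize_block_py text out) := by unfold Spec_im_sanitize_block_py; infer_instance

-- ===== CLAIM (what is proved, stated in full; the proofs are below) =====
def Claim_equal_im_sanitize_block_py : Prop := ∀ (text : String), Dom_im_sanitize_block_py text → Spec_im_sanitize_block_py text (im_sanitize_block_py text)

-- ===== LEMMAS AND PROOFS =====

-- A's per-line transform, extracted from the body of A's first loop (proof helper)
def pvFA (raw : List Char) : List Char :=
  let line := PySem.Chars.rstrip raw
  let s := PySem.Chars.strip line
  if PySem.Chars.startswith s ("```".toList) || PySem.Chars.startswith s ("References:".toList) then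
    line
  else if PySem.Chars.startswith s ("### ".toList) then
    ('【' :: PySem.Chars.strip (PySem.List.slice s (some 4) none)) ++ ['】']
  else if PySem.Chars.startswith s ("#### ".toList) then
    '-' :: ' ' :: PySem.Chars.strip (PySem.List.slice s (some 5) none)
  else if PySem.Chars.startswith s ("|".toList) && PySem.Chars.endswith s ("|".toList) then
    PySem.Chars.join [' ']
      (((PySem.Chars.splitOn (PySem.Chars.stripChars s ['|']) ['|']).filter
          (fun p => !(PySem.Chars.strip p).isEmpty)).map PySem.Chars.strip)
  else if PySem.Chars.startswith s ("- ".toList) || PySem.Chars.startswith s ("* ".toList) then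
    '⦁' :: ' ' :: PySem.Chars.strip (PySem.List.slice s (some 2) none)
  else line

-- A's blank-run step and B's last-line step (proof helpers)
def pvGA (st : List (List Char) × Int) (ln : List Char) : List (List Char) × Int :=
  if (PySem.Chars.strip ln).isEmpty then
    (if st.2 + 1 ≤ 1 then st.1 ++ [([] : List Char)] else st.1, st.2 + 1)
  else (st.1 ++ [PySem.Chars.rstrip ln], 0)

def pvGB (res : List (List Char)) (t : List Char) : List (List Char) :=
  if (PySem.Chars.strip t).isEmpty then
    if res.isEmpty || !(PySem.List.pyGet? res (-1) == some ([] : List Char)) then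
      res ++ [([] : List Char)]
    else res
  else res ++ [PySem.Chars.rstrip t]

lemma pv_dropWhile_rdropWhile_comm (p : Char → Bool) (l : List Char) :
    List.dropWhile p (List.rdropWhile p l) = List.rdropWhile p (List.dropWhile p l) := by
  induction l with
  | nil => simp
  | cons a t ih =>
    by_cases hpa : p a
    · rw [List.dropWhile_cons_of_pos hpa]
      by_cases hall : ∀ x ∈ t, p x
      · have h1 : List.rdropWhile p (a :: t) = [] := by
          rw [List.rdropWhile_eq_nil_iff]
          intro x hx
          rcases List.mem_cons.mp hx with rfl | hx
          · exact hpa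
          · exact hall x hx
        have h2 : List.dropWhile p t = [] := by
          rw [List.dropWhile_eq_nil_iff]; exact hall
        simp [h1, h2]
      · have hne : List.dropWhile p t.reverse ≠ [] := by
          rw [Ne, List.dropWhile_eq_nil_iff]
          simp only [not_forall] at hall
          obtain ⟨x, hx, hpx⟩ := hall
          exact fun h => hpx (h x (List.mem_reverse.mpr hx))
        have hcons : List.rdropWhile p (a :: t) = a :: List.rdropWhile p t := by
          rw [List.rdropWhile, List.reverse_cons, List.dropWhile_append]
          simp [List.isEmpty_iff, hne, List.rdropWhile]
        rw [hcons, List.dropWhile_cons_of_pos hpa, ih]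
    · rw [List.dropWhile_cons_of_neg hpa]
      rcases hrd : List.rdropWhile p (a :: t) with _ | ⟨b, r⟩
      · rw [List.rdropWhile_eq_nil_iff] at hrd
        exact absurd (hrd a (List.mem_cons_self)) hpa
      · obtain ⟨u, hu⟩ := List.rdropWhile_prefix p (a :: t)
        rw [hrd] at hu
        have hb : b = a := by
          have := congrArg (·.head?) hu
          simpa using this
        subst hb
        rw [List.dropWhile_cons_of_neg hpa]

lemma pv_rstrip_eq_rdropWhile (x : List Char) :
    PySem.Chars.rstrip x = List.rdropWhile PySem.Chars.isspace x := rfl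

lemma pv_strip_rstrip (x : List Char) :
    PySem.Chars.strip (PySem.Chars.rstrip x) = PySem.Chars.strip x := by
  show PySem.Chars.rstrip (PySem.Chars.lstrip _) = PySem.Chars.rstrip (PySem.Chars.lstrip x)
  rw [pv_rstrip_eq_rdropWhile, pv_rstrip_eq_rdropWhile, PySem.Chars.lstrip, PySem.Chars.lstrip,
    pv_rstrip_eq_rdropWhile, pv_dropWhile_rdropWhile_comm, List.rdropWhile_idempotent]

lemma pv_rstrip_ne_nil {x : List Char} (h : PySem.Chars.strip x ≠ []) :
    PySem.Chars.rstrip x ≠ [] := by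
  intro hnil
  apply h
  rw [pv_rstrip_eq_rdropWhile, List.rdropWhile_eq_nil_iff] at hnil
  show PySem.Chars.rstrip (PySem.Chars.lstrip x) = []
  rw [PySem.Chars.lstrip, pv_rstrip_eq_rdropWhile, List.rdropWhile_eq_nil_iff]
  exact fun c hc => hnil c ((List.dropWhile_sublist _).subset hc)

-- if p is a prefix of s and q is incomparable with p, then q is not a prefix of s
lemma pv_sw_false {s p q : List Char} (hp : PySem.Chars.startswith s p = true)
    (h1 : ¬ p <+: q) (h2 : ¬ q <+: p) : PySem.Chars.startswith s q = false := by
  rw [PySem.Chars.startswith_iff] at hp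
  rw [← Bool.not_eq_true, PySem.Chars.startswith_iff]
  intro hq
  rcases (List.prefix_or_prefix_of_prefix hp hq) with h | h
  · exact h1 h
  · exact h2 h

lemma pv_transform_eq (raw : List Char) : pvTransform raw = pvFA raw := by
  unfold pvTransform pvFA
  simp only [pv_strip_rstrip]
  by_cases h1 : PySem.Chars.startswith (PySem.Chars.strip raw) (['`','`','`']) = true
  · have f1 := pv_sw_false h1 (q := ['|']) (by decide) (by decide)
    have f2 := pv_sw_false h1 (q := ['-',' ']) (by decide) (by decide)
    have f3 := pv_sw_false h1 (q := ['*',' ']) (by decide) (by decide)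
    have f4 := pv_sw_false h1 (q := ['#','#','#','#',' ']) (by decide) (by decide)
    have f5 := pv_sw_false h1 (q := ['#','#','#',' ']) (by decide) (by decide)
    simp [h1, f1, f2, f3, f4, f5]
  by_cases h2 : PySem.Chars.startswith (PySem.Chars.strip raw) (['R','e','f','e','r','e','n','c','e','s',':']) = true
  · have f1 := pv_sw_false h2 (q := ['|']) (by decide) (by decide)
    have f2 := pv_sw_false h2 (q := ['-',' ']) (by decide) (by decide)
    have f3 := pv_sw_false h2 (q := ['*',' ']) (by decide) (by decide)
    have f4 := pv_sw_false h2 (q := ['#','#','#','#',' ']) (by decide) (by decide)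
    have f5 := pv_sw_false h2 (q := ['#','#','#',' ']) (by decide) (by decide)
    simp [h1, h2, f1, f2, f3, f4, f5]
  by_cases h3 : PySem.Chars.startswith (PySem.Chars.strip raw) (['#','#','#',' ']) = true
  · have f1 := pv_sw_false h3 (q := ['|']) (by decide) (by decide)
    have f2 := pv_sw_false h3 (q := ['-',' ']) (by decide) (by decide)
    have f3 := pv_sw_false h3 (q := ['*',' ']) (by decide) (by decide)
    have f4 := pv_sw_false h3 (q := ['#','#','#','#',' ']) (by decide) (by decide)
    simp [h1, h2, h3, f1, f2, f3, f4]
  by_cases h4 : PySem.Chars.startswith (PySem.Chars.strip raw) (['#','#','#','#',' ']) = true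
  · have f1 := pv_sw_false h4 (q := ['|']) (by decide) (by decide)
    have f2 := pv_sw_false h4 (q := ['-',' ']) (by decide) (by decide)
    have f3 := pv_sw_false h4 (q := ['*',' ']) (by decide) (by decide)
    simp [h1, h2, h3, h4, f1, f2, f3]
  by_cases h5 : PySem.Chars.startswith (PySem.Chars.strip raw) (['|']) = true
  · have f1 := pv_sw_false h5 (q := ['-',' ']) (by decide) (by decide)
    have f2 := pv_sw_false h5 (q := ['*',' ']) (by decide) (by decide)
    by_cases h6 : PySem.Chars.endswith (PySem.Chars.strip raw) (['|']) = true
    · simp [h1, h2, h3, h4, h5, h6]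
    · simp [h1, h2, h3, h4, h5, h6, f1, f2]
  by_cases h7 : PySem.Chars.startswith (PySem.Chars.strip raw) (['-',' ']) = true
  · simp [h1, h2, h3, h4, h5, h7]
  by_cases h8 : PySem.Chars.startswith (PySem.Chars.strip raw) (['*',' ']) = true
  · simp [h1, h2, h3, h4, h5, h7, h8]
  simp [h1, h2, h3, h4, h5, h7, h8]

-- the invariant tying A's blank_run counter to B's last-emitted-line test
def pvInv (acc : List (List Char)) (br : Int) : Prop :=
  (br = 0 ∧ (acc = [] ∨ acc.getLast? ≠ some [])) ∨ (1 ≤ br ∧ acc.getLast? = some [])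

lemma pv_step (acc : List (List Char)) (br : Int) (t : List Char) (hinv : pvInv acc br) :
    pvGB acc t = (pvGA (acc, br) t).1 ∧ pvInv (pvGA (acc, br) t).1 (pvGA (acc, br) t).2 := by
  unfold pvGA pvGB
  by_cases hb : (PySem.Chars.strip t).isEmpty = true
  · rcases hinv with ⟨hbr, hacc⟩ | ⟨hbr, hlast⟩
    · have hcond : (acc.isEmpty || !(PySem.List.pyGet? acc (-1) == some ([] : List Char))) = true := by
        rcases hacc with rfl | hlast
        · rfl
        · rw [PySem.List.pyGet?_neg_one]
          simp only [Bool.or_eq_true, Bool.not_eq_eq_eq_not, Bool.not_true, beq_eq_false_iff_ne]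
          exact Or.inr hlast
      constructor
      · simp [hb, hcond, hbr]
      · subst hbr
        simp only [hb, if_true, zero_add]
        exact Or.inr ⟨le_refl 1, by simp⟩
    · have hne : acc ≠ [] := by
        intro h; rw [h] at hlast; simp at hlast
      have hcond : (acc.isEmpty || !(PySem.List.pyGet? acc (-1) == some ([] : List Char))) = false := by
        rw [PySem.List.pyGet?_neg_one]
        simp [hne, hlast]
      constructor
      · simp [hb, hcond, show ¬ br + 1 ≤ 1 by omega]
      · simp only [hb, if_true, show ¬ br + 1 ≤ 1 by omega]
        exact Or.inr ⟨by omega, hlast⟩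
  · have hne : PySem.Chars.rstrip t ≠ [] :=
      pv_rstrip_ne_nil (by simpa [List.isEmpty_iff] using hb)
    constructor
    · simp [hb]
    · simp only [hb]
      exact Or.inl ⟨rfl, Or.inr (by simp [hne])⟩

lemma pv_loop (ts : List (List Char)) : ∀ (acc : List (List Char)) (br : Int), pvInv acc br →
    ts.foldl pvGB acc = (ts.foldl pvGA (acc, br)).1 := by
  induction ts with
  | nil => intro acc br _; rfl
  | cons t ts ih =>
    intro acc br hinv
    obtain ⟨h1, h2⟩ := pv_step acc br t hinv
    simp only [List.foldl_cons, h1]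
    have := ih (pvGA (acc, br) t).1 (pvGA (acc, br) t).2 h2
    simpa using this

lemma pv_stepA_eq : (fun (out : List (List Char)) (raw : List Char) =>
    let line := PySem.Chars.rstrip raw
    let s := PySem.Chars.strip line
    if PySem.Chars.startswith s ("```".toList) || PySem.Chars.startswith s ("References:".toList) then
      out ++ [line]
    else if PySem.Chars.startswith s ("### ".toList) then
      out ++ [('【' :: PySem.Chars.strip (PySem.List.slice s (some 4) none)) ++ ['】']]
    else if PySem.Chars.startswith s ("#### ".toList) then
      out ++ ['-' :: ' ' :: PySem.Chars.strip (PySem.List.slice s (some 5) none)]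
    else if PySem.Chars.startswith s ("|".toList) && PySem.Chars.endswith s ("|".toList) then
      out ++ [PySem.Chars.join [' ']
        (((PySem.Chars.splitOn (PySem.Chars.stripChars s ['|']) ['|']).filter
            (fun p => !(PySem.Chars.strip p).isEmpty)).map PySem.Chars.strip)]
    else if PySem.Chars.startswith s ("- ".toList) || PySem.Chars.startswith s ("* ".toList) then
      out ++ ['⦁' :: ' ' :: PySem.Chars.strip (PySem.List.slice s (some 2) none)]
    else out ++ [line])
    = fun out raw => out ++ [pvFA raw] := by
  funext out raw
  unfold pvFA
  dsimp only
  split_ifs <;> rfl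

lemma pv_lines_eq (lines : List (List Char)) :
    lines.foldl (fun res raw =>
      let t := pvTransform raw
      if (PySem.Chars.strip t).isEmpty then
        if res.isEmpty || !(PySem.List.pyGet? res (-1) == some ([] : List Char)) then
          res ++ [([] : List Char)]
        else res
      else res ++ [PySem.Chars.rstrip t]) ([] : List (List Char))
    = ((lines.foldl (fun out raw => out ++ [pvFA raw]) []).foldl pvGA
        (([], 0) : List (List Char) × Int)).1 := by
  rw [PySem.List.foldl_append_singleton_eq_map, List.nil_append]
  have hB : (fun (res : List (List Char)) (raw : List Char) =>
      let t := pvTransform raw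
      if (PySem.Chars.strip t).isEmpty then
        if res.isEmpty || !(PySem.List.pyGet? res (-1) == some ([] : List Char)) then
          res ++ [([] : List Char)]
        else res
      else res ++ [PySem.Chars.rstrip t])
      = fun res raw => pvGB res (pvTransform raw) := rfl
  rw [hB]
  simp only [pv_transform_eq]
  rw [← List.foldl_map]
  exact pv_loop (lines.map pvFA) [] 0 (Or.inl ⟨rfl, Or.inl rfl⟩)

-- ===== VERDICT (by name: the statement is the Claim_ definition above) =====
theorem im_sanitize_block_py_spec : Claim_equal_im_sanitize_block_py := by
  unfold Claim_equal_im_sanitize_block_py Spec_im_sanitize_block_py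
  intro text _
  unfold im_sanitize_block_py im_sanitize_block_py_alt
  rw [pv_stepA_eq]
  by_cases hmd : (PySem.Chars.strip text.toList).isEmpty = true
  · simp only [hmd, if_true]
  · simp only [hmd]
    rw [show (fun (st : List (List Char) × Int) (ln : List Char) =>
      if (PySem.Chars.strip ln).isEmpty then
        (if st.2 + 1 ≤ 1 then st.1 ++ [([] : List Char)] else st.1, st.2 + 1)
      else (st.1 ++ [PySem.Chars.rstrip ln], 0)) = pvGA from rfl]
    rw [pv_lines_eq]
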